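-- pv_equiv track=rewrite | github.com/LeeDayday/programmers | src/python/30-131127.py | solution
-- ===== SOURCE A (Python) =====
-- from collections import Counter
--
-- def solution(want, number, discount):
--     answer = 0
--     data = dict()
--     for i in range(len(want)):
--         data[want[i]] = number[i]
--
--     for i in range(len(discount) - 9):
--         if data == Counter(discount[i:i+10]):
--             answer += 1
--
--     return answer
-- ===== SOURCE B (Python) =====
-- from collections import Counter
--
-- def solution(want, number, discount):
--     data = dict(zip(want, number))
--     n = len(discount)
--     if n < 10:
--         return 0
--     cur = Counter(discount[:10])
--     answer = 1 if data == cur else 0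
--     for i in range(1, n - 9):
--         old = discount[i - 1]
--         c = cur[old] - 1
--         if c == 0:
--             del cur[old]
--         else:
--             cur[old] = c
--         new = discount[i + 9]
--         cur[new] = cur.get(new, 0) + 1
--         if data == cur:
--             answer += 1
--     return answer
-- ===== Notes on version B (the rewrite author's own statement) =====
-- stated objective: faster
-- what changed: B keeps one running window count (decrement the key leaving the window, deleting it at zero, increment the key entering) and compares it to the target dict, instead of rebuilding a fresh Counter of all 10 elements for every window as A does; B also builds the target dict with dict(zip(want, number)).
import Mathlib
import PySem

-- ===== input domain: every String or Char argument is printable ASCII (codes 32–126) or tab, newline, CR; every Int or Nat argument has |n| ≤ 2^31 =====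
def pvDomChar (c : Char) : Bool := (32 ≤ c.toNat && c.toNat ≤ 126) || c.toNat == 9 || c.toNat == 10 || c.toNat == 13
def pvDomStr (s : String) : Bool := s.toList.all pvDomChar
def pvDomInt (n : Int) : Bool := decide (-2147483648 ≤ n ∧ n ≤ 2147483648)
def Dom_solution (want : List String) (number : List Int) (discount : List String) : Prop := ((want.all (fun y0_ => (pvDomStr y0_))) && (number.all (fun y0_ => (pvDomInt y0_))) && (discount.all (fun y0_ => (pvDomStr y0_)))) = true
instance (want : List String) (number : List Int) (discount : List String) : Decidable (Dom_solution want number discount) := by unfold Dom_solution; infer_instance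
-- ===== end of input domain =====

-- B keeps ONE running window count (decrement the leaving key, delete at zero, increment the
-- entering key) instead of rebuilding a Counter for every window as A does; return value only.

-- Python's `d1 == d2` on dicts: mapping equality, insertion order ignored (exact; used by both
-- ports because both Pythons compare dicts with `==`).
def pyDictEq (d1 d2 : PySem.Dict String Int) : Bool :=
  (d1.keys.all fun k => d2.get? k == d1.get? k) && (d2.keys.all fun k => d1.get? k == d2.get? k)

-- ===== PORT A =====
def solution (want : List String) (number : List Int) (discount : List String) : Int :=
  let data := (PySem.List.pyRange 0 (want.length : Int)).foldl
      (fun d i => d.insert (PySem.List.pyGetD want i "") (PySem.List.pyGetD number i 0))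
      PySem.Dict.empty
  let answer := (PySem.List.pyRange 0 ((discount.length : Int) - 9)).foldl
      (fun answer i =>
        if pyDictEq data (PySem.Dict.counter (PySem.List.slice discount (some i) (some (i + 10))))
        then answer + 1 else answer) (0 : Int)
  answer

-- ===== PORT B =====
def solution_alt (want : List String) (number : List Int) (discount : List String) : Int :=
  let data := (want.zip number).foldl (fun d p => d.insert p.1 p.2) PySem.Dict.empty
  let n := discount.length
  if n < 10 then 0
  else
    let cur0 := PySem.Dict.counter (PySem.List.slice discount (some 0) (some 10))
    let answer0 : Int := if pyDictEq data cur0 then 1 else 0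
    ((PySem.List.pyRange 1 ((n : Int) - 9)).foldl
      (fun (s : Int × PySem.Dict String Int) i =>
        let old := PySem.List.pyGetD discount (i - 1) ""
        let c := s.2.getD old 0 - 1
        let cur1 := if c = 0 then s.2.erase old else s.2.insert old c
        let nw := PySem.List.pyGetD discount (i + 9) ""
        let cur2 := cur1.insert nw (cur1.getD nw 0 + 1)
        (s.1 + (if pyDictEq data cur2 then 1 else 0), cur2))
      (answer0, cur0)).1

-- ===== PRECONDITION & SPEC =====
-- Pre_ excludes exactly the inputs where A raises IndexError: `number[i]` with len(number) < len(want).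
def Pre_solution (want : List String) (number : List Int) (discount : List String) : Prop :=
  want.length ≤ number.length
instance (want : List String) (number : List Int) (discount : List String) : Decidable (Pre_solution want number discount) := by unfold Pre_solution; infer_instance

def pvWitness_solution : List String × List Int × List String :=
  (["a"], [2], ["a", "a", "b", "a", "a", "a", "a", "a", "a", "a", "a", "b"])

def Spec_solution (want : List String) (number : List Int) (discount : List String) (out : Int) : Prop := out = solution_alt want number discount
instance (want : List String) (number : List Int) (discount : List String) (out : Int) : Decidable (Spec_solution want number discount out) := by unfold Spec_solution; infer_instance

-- ===== CLAIM (what is proved, stated in full; the proofs are below) =====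
def Claim_equal_solution : Prop := ∀ (want : List String) (number : List Int) (discount : List String), Dom_solution want number discount → Pre_solution want number discount → Spec_solution want number discount (solution want number discount)

-- ===== LEMMAS AND PROOFS =====

-- the window of length 10 starting at index i, and the per-window match predicate
def pvWin (discount : List String) (i : Nat) : List String := (discount.drop i).take 10

def pvP (data : PySem.Dict String Int) (discount : List String) (i : Int) : Bool :=
  pyDictEq data (PySem.Dict.counter (pvWin discount i.toNat))

theorem get?_counter_char (xs : List String) (k : String) :
    (PySem.Dict.counter xs).get? k = if k ∈ xs then some ((xs.count k : Int)) else none := by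
  by_cases hm : k ∈ xs
  · have hc : (PySem.Dict.counter xs).contains k = true := by
      rw [PySem.Dict.contains_counter]; simpa using hm
    rw [PySem.Dict.contains_eq_isSome_get?] at hc
    obtain ⟨v, hv⟩ := Option.isSome_iff_exists.mp hc
    have := PySem.Dict.getD_counter xs k
    rw [PySem.Dict.getD_eq_get?_getD, hv] at this
    simp at this
    simp [hm, hv, this]
  · have : (PySem.Dict.counter xs).get? k = none := by
      rw [PySem.Dict.get?_eq_none_iff_not_mem_keys, PySem.Dict.keys_counter]
      simpa [PySem.Set.mem_ofList] using hm
    simp [hm, this]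

theorem find?_filter_ne (k k' : String) (h : k' ≠ k) (rest : List (String × Int)) :
    List.find? (fun p => p.1 == k') (rest.filter (fun p => !(p.1 == k)))
    = List.find? (fun p => p.1 == k') rest := by
  have hk1 : (k == k') = false := by simp; exact fun hh => h hh.symm
  have hk2 : (k' == k) = false := by simp [h]
  induction rest with
  | nil => simp
  | cons p rest ih =>
    by_cases h1 : p.1 = k
    · simp [h1, List.find?, hk1, ih]
    · have h1' : (p.1 == k) = false := by simp [h1]
      by_cases h2 : p.1 = k'
      · simp [List.filter, h1', h2, hk2, List.find?]
      · have h2' : (p.1 == k') = false := by simp [h2]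
        simp [List.filter, h1', List.find?, h2', ih]

theorem get?_erase_char (d : PySem.Dict String Int) (k k' : String) :
    (d.erase k).get? k' = if k' = k then none else d.get? k' := by
  rcases d with ⟨items⟩
  by_cases h : k' = k
  · subst h
    simp only [PySem.Dict.erase, PySem.Dict.get?, if_pos rfl]
    rw [List.find?_eq_none.mpr]
    · rfl
    · intro p hp
      have := (List.mem_filter.mp hp).2
      simp at this ⊢
      exact fun hh => absurd hh this
  · simp only [PySem.Dict.erase, PySem.Dict.get?, if_neg h]
    rw [find?_filter_ne k k' h]

theorem pyDictEq_congr (data d e : PySem.Dict String Int)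
    (h : ∀ k, d.get? k = e.get? k) : pyDictEq data d = pyDictEq data e := by
  unfold pyDictEq
  have hmem : ∀ k : String, k ∈ d.keys ↔ k ∈ e.keys := by
    intro k
    constructor <;> intro hk
    · by_contra hne
      have := (PySem.Dict.get?_eq_none_iff_not_mem_keys e k).mpr hne
      rw [← h k, PySem.Dict.get?_eq_none_iff_not_mem_keys] at this
      exact this hk
    · by_contra hne
      have := (PySem.Dict.get?_eq_none_iff_not_mem_keys d k).mpr hne
      rw [h k, PySem.Dict.get?_eq_none_iff_not_mem_keys] at this
      exact this hk
  have h1 : (data.keys.all fun k => d.get? k == data.get? k)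
      = (data.keys.all fun k => e.get? k == data.get? k) := by
    congr 1; funext k; rw [h k]
  rw [h1]
  congr 1
  rw [Bool.eq_iff_iff]
  simp only [List.all_eq_true]
  constructor
  · intro hh k hk
    rw [← h k]; exact hh k ((hmem k).mpr hk)
  · intro hh k hk
    rw [h k]; exact hh k ((hmem k).mp hk)

theorem data_eq (want : List String) (number : List Int) (h : want.length ≤ number.length) :
    (PySem.List.pyRange 0 (want.length : Int)).foldl
      (fun d i => d.insert (PySem.List.pyGetD want i "") (PySem.List.pyGetD number i 0))
      PySem.Dict.empty
    = (want.zip number).foldl (fun d p => d.insert p.1 p.2) PySem.Dict.empty := by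
  have hz : (List.range want.length).map (fun k => (want.getD k "", number.getD k 0))
      = want.zip number := by
    apply List.ext_getElem
    · simp [Nat.min_eq_left h]
    · intro i h1 h2
      simp only [List.getElem_map, List.getElem_range, List.getElem_zip]
      have hi : i < want.length := by simpa using h1
      have hi2 : i < number.length := lt_of_lt_of_le hi h
      simp [List.getD_eq_getElem?_getD, List.getElem?_eq_getElem, hi, hi2]
  rw [PySem.List.pyRange_zero_natCast, List.foldl_map]
  rw [← hz, List.foldl_map]
  apply PySem.List.foldl_congr_mem
  intro acc x hx
  have hxl : x < want.length := by simpa using hx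
  simp [PySem.List.pyGetD_natCast]

theorem step_get? (discount : List String) (j : Nat) (hj : 1 ≤ j) (hjL : j + 9 < discount.length)
    (cur : PySem.Dict String Int)
    (hcur : ∀ k, cur.get? k = (PySem.Dict.counter (pvWin discount (j - 1))).get? k) :
    ∀ k,
      ((if cur.getD (discount.getD (j - 1) "") 0 - 1 = 0
          then cur.erase (discount.getD (j - 1) "")
          else cur.insert (discount.getD (j - 1) "") (cur.getD (discount.getD (j - 1) "") 0 - 1)).insert
        (discount.getD (j + 9) "")
        (((if cur.getD (discount.getD (j - 1) "") 0 - 1 = 0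
            then cur.erase (discount.getD (j - 1) "")
            else cur.insert (discount.getD (j - 1) "") (cur.getD (discount.getD (j - 1) "") 0 - 1)).getD
          (discount.getD (j + 9) "") 0) + 1)).get? k
      = (PySem.Dict.counter (pvWin discount j)).get? k := by
  have hj1 : j - 1 < discount.length := by omega
  have hx : discount.getD (j - 1) "" = discount[j - 1] := List.getD_eq_getElem _ _ hj1
  have hy : discount.getD (j + 9) "" = discount[j + 9] := List.getD_eq_getElem _ _ hjL
  set x := discount[j - 1] with hxdef
  set y := discount[j + 9] with hydef
  set mid := (discount.drop j).take 9 with hmid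
  have hw : pvWin discount (j - 1) = x :: mid := by
    unfold pvWin
    rw [← List.getElem_cons_drop (as := discount) (i := j - 1) hj1]
    have h1 : j - 1 + 1 = j := by omega
    rw [h1]
    rfl
  have hw' : pvWin discount j = mid ++ [y] := by
    unfold pvWin
    have hlen : 9 < (discount.drop j).length := by simp; omega
    rw [show (10 : Nat) = 9 + 1 from rfl, List.take_succ]
    congr 1
    rw [List.getElem?_eq_getElem hlen]
    simp [hydef]
  have hcurD : ∀ k, cur.getD k 0 = (PySem.Dict.counter (pvWin discount (j-1))).getD k 0 := by
    intro k
    rw [PySem.Dict.getD_eq_get?_getD, hcur k, ← PySem.Dict.getD_eq_get?_getD]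
  have hgx : cur.getD x 0 = ((mid.count x : Int)) + 1 := by
    rw [hcurD, PySem.Dict.getD_counter, hw]
    simp [List.count_cons]
  intro k
  rw [hx, hy]
  have hcur1 : ∀ k', (if cur.getD x 0 - 1 = 0
          then cur.erase x
          else cur.insert x (cur.getD x 0 - 1)).get? k'
      = if k' = x then (if mid.count x = 0 then none else some ((mid.count x : Int))) else cur.get? k' := by
    intro k'
    by_cases hc : cur.getD x 0 - 1 = 0
    · have hc0 : mid.count x = 0 := by
        rw [hgx] at hc; omega
      rw [if_pos hc, get?_erase_char, hc0]
      simp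
    · have hc0 : mid.count x ≠ 0 := by
        intro h0; rw [hgx, h0] at hc; simp at hc
      rw [if_neg hc, PySem.Dict.get?_insert, hgx]
      by_cases hk' : k' = x
      · simp [hk', hc0]
      · simp [hk']
  have hgy : (if cur.getD x 0 - 1 = 0
          then cur.erase x
          else cur.insert x (cur.getD x 0 - 1)).getD y 0 = ((mid.count y : Int)) := by
    rw [PySem.Dict.getD_eq_get?_getD, hcur1 y]
    by_cases hxy : y = x
    · rw [hxy]
      by_cases h0 : mid.count x = 0 <;> simp [h0, hxy]
    · rw [if_neg hxy, ← PySem.Dict.getD_eq_get?_getD, hcurD, PySem.Dict.getD_counter, hw]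
      simp [List.count_cons, hxy, Ne.symm hxy]
  rw [PySem.Dict.get?_insert, hgy, get?_counter_char, hw']
  by_cases hky : k = y
  · subst hky
    simp [List.count_append, List.count_cons]
  · rw [if_neg hky]
    rw [hcur1 k]
    have hmem : (k ∈ mid ++ [y]) ↔ k ∈ mid := by simp [hky]
    have hcnt : (mid ++ [y]).count k = mid.count k := by
      simp [List.count_append, List.count_cons, hky, Ne.symm hky]
    by_cases hkx : k = x
    · rw [if_pos hkx]
      by_cases h0 : mid.count x = 0
      · have hnm : k ∉ mid := by
          rw [hkx, ← List.count_eq_zero]; exact h0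
        simp [h0, hmem, hnm]
      · have hm : k ∈ mid := by
          rw [hkx, ← List.count_pos_iff]; omega
        have hxy : ¬x = y := by rw [← hkx]; exact hky
        simp [h0, hmem, hm, hcnt, hkx, List.count_cons, hxy]
        exact ⟨by rwa [hkx] at hm, fun h => hxy h.symm⟩
    · rw [if_neg hkx, hcur, get?_counter_char, hw]
      have hmem2 : (k ∈ x :: mid) ↔ k ∈ mid := by simp [hkx]
      have hxk : ¬x = k := fun h => hkx h.symm
      have hcnt2 : (x :: mid).count k = mid.count k := by simp [List.count_cons, hkx, hxk]
      by_cases hm : k ∈ mid <;> simp [hm, hmem, hmem2, hcnt, hcnt2, hxk]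

theorem slide (data : PySem.Dict String Int) (discount : List String) :
    ∀ (m j : Nat), 1 ≤ j → (j : Int) + m = (discount.length : Int) - 9 →
    ∀ (cur : PySem.Dict String Int) (a : Int),
    (∀ k, cur.get? k = (PySem.Dict.counter (pvWin discount (j - 1))).get? k) →
    ((PySem.List.pyRange (j : Int) ((discount.length : Int) - 9)).foldl
      (fun (s : Int × PySem.Dict String Int) i =>
        let old := PySem.List.pyGetD discount (i - 1) ""
        let c := s.2.getD old 0 - 1
        let cur1 := if c = 0 then s.2.erase old else s.2.insert old c
        let nw := PySem.List.pyGetD discount (i + 9) ""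
        let cur2 := cur1.insert nw (cur1.getD nw 0 + 1)
        (s.1 + (if pyDictEq data cur2 then 1 else 0), cur2))
      (a, cur)).1
    = a + ((PySem.List.pyRange (j : Int) ((discount.length : Int) - 9)).countP (pvP data discount) : Int) := by
  intro m
  induction m with
  | zero =>
    intro j hj hj0 cur a hcur
    have hnil : PySem.List.pyRange (j : Int) ((discount.length : Int) - 9) = [] :=
      List.eq_nil_iff_forall_not_mem.mpr (fun x hx => by
        rw [PySem.List.mem_pyRange_one] at hx; omega)
    simp [hnil]
  | succ m ih =>
    intro j hj hj0 cur a hcur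
    have hlt : (j : Int) < (discount.length : Int) - 9 := by push_cast at hj0 ⊢; omega
    have hjL : j + 9 < discount.length := by omega
    rw [PySem.List.pyRange_one_cons hlt]
    rw [List.foldl_cons, List.countP_cons]
    have e1 : PySem.List.pyGetD discount ((j : Int) - 1) "" = discount.getD (j - 1) "" := by
      have : (j : Int) - 1 = ((j - 1 : Nat) : Int) := by omega
      rw [this, PySem.List.pyGetD_natCast]
    have e2 : PySem.List.pyGetD discount ((j : Int) + 9) "" = discount.getD (j + 9) "" := by
      have : (j : Int) + 9 = ((j + 9 : Nat) : Int) := by push_cast; ring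
      rw [this, PySem.List.pyGetD_natCast]
    simp only [e1, e2]
    -- the updated dictionary
    set cur2 := (if cur.getD (discount.getD (j - 1) "") 0 - 1 = 0
          then cur.erase (discount.getD (j - 1) "")
          else cur.insert (discount.getD (j - 1) "") (cur.getD (discount.getD (j - 1) "") 0 - 1)).insert
        (discount.getD (j + 9) "")
        (((if cur.getD (discount.getD (j - 1) "") 0 - 1 = 0
            then cur.erase (discount.getD (j - 1) "")
            else cur.insert (discount.getD (j - 1) "") (cur.getD (discount.getD (j - 1) "") 0 - 1)).getD
          (discount.getD (j + 9) "") 0) + 1) with hcur2def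
    have hcur2 : ∀ k, cur2.get? k = (PySem.Dict.counter (pvWin discount j)).get? k :=
      step_get? discount j hj hjL cur hcur
    have hmatch : pyDictEq data cur2 = pvP data discount (j : Int) := by
      rw [pyDictEq_congr data cur2 _ hcur2]
      unfold pvP
      norm_num
    have hnext := ih (j + 1) (by omega) (by push_cast at hj0 ⊢; omega) cur2
      (a + (if pyDictEq data cur2 then 1 else 0))
      (by simpa using hcur2)
    have hcast : ((j + 1 : Nat) : Int) = (j : Int) + 1 := by push_cast; ring
    rw [hcast] at hnext
    rw [hnext, hmatch]
    by_cases hp : pvP data discount (j : Int) <;> simp [hp] <;> push_cast <;> ring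

theorem main_eq (want : List String) (number : List Int) (discount : List String)
    (hpre : want.length ≤ number.length) :
    solution want number discount = solution_alt want number discount := by
  unfold solution solution_alt
  simp only []
  rw [data_eq want number hpre]
  set data := (want.zip number).foldl (fun d p => d.insert p.1 p.2) PySem.Dict.empty with hdata
  by_cases hlen : discount.length < 10
  · rw [if_pos hlen]
    have hnil : PySem.List.pyRange 0 ((discount.length : Int) - 9) = [] :=
      List.eq_nil_iff_forall_not_mem.mpr (fun x hx => by
        rw [PySem.List.mem_pyRange_one] at hx; omega)
    simp [hnil]
  · rw [if_neg hlen]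
    push_neg at hlen
    -- A side: congr to pvP, then count
    have hA : (PySem.List.pyRange 0 ((discount.length : Int) - 9)).foldl
        (fun answer i =>
          if pyDictEq data (PySem.Dict.counter (PySem.List.slice discount (some i) (some (i + 10))))
          then answer + 1 else answer) (0 : Int)
        = ((PySem.List.pyRange 0 ((discount.length : Int) - 9)).countP (pvP data discount) : Int) := by
      rw [PySem.List.foldl_congr_mem _ _
          (fun answer i => if pvP data discount i then answer + 1 else answer) _ ?_]
      · rw [PySem.List.foldl_if_add_one]; ring
      · intro acc i hi
        rw [PySem.List.mem_pyRange_one] at hi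
        have h0 : (0 : Int) ≤ i := hi.1
        have hslice : PySem.List.slice discount (some i) (some (i + 10)) = pvWin discount i.toNat := by
          rw [PySem.List.slice_toNat discount h0 (by omega)]
          unfold pvWin
          congr 1
          omega
        rw [hslice]
        rfl
    rw [hA]
    -- cur0 is the counter of window 0
    have hcur0 : PySem.Dict.counter (PySem.List.slice discount (some 0) (some 10))
        = PySem.Dict.counter (pvWin discount 0) := by
      congr 1
      rw [show ((0 : Int)) = ((0 : Nat) : Int) from rfl, show ((10 : Int)) = ((10 : Nat) : Int) from rfl,
        PySem.List.slice_natCast]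
      unfold pvWin
      norm_num
    rw [hcur0]
    have hone : ((1 : Nat) : Int) = (1 : Int) := by norm_num
    have hslide := slide data discount (discount.length - 10) 1 (le_refl 1)
      (by push_cast; omega)
      (PySem.Dict.counter (pvWin discount 0))
      (if pyDictEq data (PySem.Dict.counter (pvWin discount 0)) then 1 else 0)
      (by intro k; norm_num)
    rw [hone] at hslide
    rw [hslide]
    -- split range at 0
    have hsplit : PySem.List.pyRange 0 ((discount.length : Int) - 9)
        = 0 :: PySem.List.pyRange 1 ((discount.length : Int) - 9) := by
      rw [PySem.List.pyRange_one_cons (by push_cast; omega)]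
      norm_num
    rw [hsplit, List.countP_cons]
    have hp0 : pvP data discount 0 = pyDictEq data (PySem.Dict.counter (pvWin discount 0)) := rfl
    by_cases hp : pyDictEq data (PySem.Dict.counter (pvWin discount 0)) <;>
      simp [hp0, hp] <;> push_cast <;> ring

-- ===== VERDICT (by name: the statement is the Claim_ definition above) =====
theorem solution_spec : Claim_equal_solution := by
  intro want number discount _ hpre
  exact main_eq want number discount hpre
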